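-- pv_equiv track=rewrite | github.com/hmx222/JScanner2 | AI/split_code.py | has_valid_slash
-- ===== SOURCE A (Python) =====
-- def has_valid_slash(content):
--     """判断内容中是否存在至少一个/，其左侧或右侧有数字/字母"""
--     for i, char in enumerate(content):
--         if char == '/':
--             # 检查左侧是否有数字/字母（i > 0表示不是第一个字符）
--             left_valid = i > 0 and content[i - 1].isalnum()
--             # 检查右侧是否有数字/字母（i < len-1表示不是最后一个字符）
--             right_valid = i < len(content) - 1 and content[i + 1].isalnum()
--             if left_valid or right_valid:
--                 return True
--     return False
-- ===== SOURCE B (Python) =====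
-- def has_valid_slash(content):
--     """判断内容中是否存在至少一个/，其左侧或右侧有数字/字母"""
--     return any(('/' + c) in content or (c + '/') in content
--                for c in set(content) if c.isalnum())
-- ===== Notes on version B (the rewrite author's own statement) =====
-- stated objective: alternative
-- what changed: Replaces A's positional scan with neighbor index checks by a substring-search formulation: for each distinct alphanumeric character of the string, test whether the two-character pattern slash-then-char or char-then-slash occurs as a substring; no positions or neighbor indices are ever examined.
import Mathlib
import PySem

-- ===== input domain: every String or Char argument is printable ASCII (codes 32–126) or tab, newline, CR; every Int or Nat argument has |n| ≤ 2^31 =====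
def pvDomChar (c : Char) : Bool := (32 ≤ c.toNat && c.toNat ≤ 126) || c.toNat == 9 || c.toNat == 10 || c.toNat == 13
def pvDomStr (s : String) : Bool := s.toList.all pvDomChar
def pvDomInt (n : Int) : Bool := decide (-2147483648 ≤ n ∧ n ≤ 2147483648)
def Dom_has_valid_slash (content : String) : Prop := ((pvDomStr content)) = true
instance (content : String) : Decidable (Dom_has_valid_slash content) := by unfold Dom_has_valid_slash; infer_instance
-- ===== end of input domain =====

-- B abandons A's positional scan: it iterates over the DISTINCT alphanumeric characters c of the
-- string and asks whether the two-character pattern "/c" or "c/" occurs as a substring.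

-- ===== PORT A =====
-- loop body of A: walks list(enumerate(content)); lookups content[i-1]/content[i+1]
-- are guarded by i > 0 / i < len-1 exactly as in the Python (the guarded pyGetD is in range).
def hvsGo (cs : List Char) : List (Int × Char) → Bool
  | [] => false
  | (i, c) :: rest =>
    if c = '/' then
      let left_valid := decide (i > 0) && PySem.Chars.isalnum (PySem.List.pyGetD cs (i - 1) ' ')
      let right_valid := decide (i < (cs.length : Int) - 1) && PySem.Chars.isalnum (PySem.List.pyGetD cs (i + 1) ' ')
      if left_valid || right_valid then true else hvsGo cs rest
    else hvsGo cs rest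

def has_valid_slash (content : String) : Bool :=
  hvsGo content.toList (PySem.List.enumerate content.toList 0)

-- ===== PORT B =====
-- any('/'+c in content or c+'/' in content for c in set(content) if c.isalnum())
def has_valid_slash_alt (content : String) : Bool :=
  (PySem.Set.ofList content.toList).any fun c =>
    PySem.Chars.isalnum c &&
      (PySem.Chars.isIn ['/', c] content.toList || PySem.Chars.isIn [c, '/'] content.toList)

-- ===== PRECONDITION & SPEC =====
def Spec_has_valid_slash (content : String) (out : Bool) : Prop := out = has_valid_slash_alt content
instance (content : String) (out : Bool) : Decidable (Spec_has_valid_slash content out) := by unfold Spec_has_valid_slash; infer_instance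

-- ===== CLAIM (what is proved, stated in full; the proofs are below) =====
def Claim_equal_has_valid_slash : Prop := ∀ (content : String), Dom_has_valid_slash content → Spec_has_valid_slash content (has_valid_slash content)

-- ===== LEMMAS AND PROOFS =====

-- the test A performs at index i, written over Nat indices with getD
def slashAt (cs : List Char) (i : Nat) : Bool :=
  (cs.getD i ' ' == '/') &&
    ((decide (0 < i) && PySem.Chars.isalnum (cs.getD (i - 1) ' ')) ||
     (decide (i + 1 < cs.length) && PySem.Chars.isalnum (cs.getD (i + 1) ' ')))

-- one step of A's loop, as a boolean disjunction
lemma hvsGo_cons (cs : List Char) (i : Int) (c : Char) (rest : List (Int × Char)) :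
    hvsGo cs ((i, c) :: rest) =
      ((c == '/') &&
        ((decide (i > 0) && PySem.Chars.isalnum (PySem.List.pyGetD cs (i - 1) ' ')) ||
         (decide (i < (cs.length : Int) - 1) && PySem.Chars.isalnum (PySem.List.pyGetD cs (i + 1) ' ')))
       || hvsGo cs rest) := by
  conv_lhs => rw [hvsGo]
  by_cases hc : c = '/'
  · simp only [hc, beq_self_eq_true, Bool.true_and, if_true]
    cases hL : ((decide ((0:Int) < i) && PySem.Chars.isalnum (PySem.List.pyGetD cs (i - 1) ' ')) ||
      (decide (i < (cs.length : Int) - 1) && PySem.Chars.isalnum (PySem.List.pyGetD cs (i + 1) ' ')))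
    · rw [if_neg (by simp)]
      simp
    · rw [if_pos (by simp)]
      simp
  · rw [if_neg hc]
    simp [beq_eq_false_iff_ne.mpr hc]

lemma cond_eq (cs : List Char) (s : Nat) :
    ((cs.getD s ' ' == '/') &&
      ((decide ((s : Int) > 0) && PySem.Chars.isalnum (PySem.List.pyGetD cs ((s : Int) - 1) ' ')) ||
       (decide ((s : Int) < (cs.length : Int) - 1) && PySem.Chars.isalnum (PySem.List.pyGetD cs ((s : Int) + 1) ' '))))
    = slashAt cs s := by
  unfold slashAt
  have g1 : decide ((s : Int) > 0) = decide (0 < s) := by rw [decide_eq_decide]; omega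
  have g2 : decide ((s : Int) < (cs.length : Int) - 1) = decide (s + 1 < cs.length) := by
    rw [decide_eq_decide]; omega
  by_cases h0 : s = 0
  · subst h0
    rw [g1, g2, show ((0 : Nat) : Int) + 1 = (((0 + 1 : Nat)) : Int) from by norm_num]
    simp only [PySem.List.pyGetD_natCast]
    simp
  · rw [g1, g2, show ((s : Int) - 1) = (((s - 1 : Nat)) : Int) from by omega,
      show ((s : Int) + 1) = (((s + 1 : Nat)) : Int) from by push_cast; ring]
    simp only [PySem.List.pyGetD_natCast]

-- A's loop from position s returns true iff slashAt holds at some i ≥ s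
lemma hvsGo_iff (cs : List Char) (s : Nat) :
    hvsGo cs (PySem.List.enumerate (cs.drop s) s) = true ↔
      ∃ i : Nat, s ≤ i ∧ i < cs.length ∧ slashAt cs i = true := by
  induction hn : cs.length - s using Nat.strong_induction_on generalizing s with
  | _ n ih =>
    by_cases hs : s < cs.length
    · rw [List.drop_eq_getElem_cons hs, PySem.List.enumerate_cons, hvsGo_cons]
      have hget : (cs[s] == '/') = (cs.getD s ' ' == '/') := by
        rw [List.getD_eq_getElem?_getD, List.getElem?_eq_getElem hs]; rfl
      rw [hget, cond_eq,
        show ((s : Int) + 1) = ((s + 1 : Nat) : Int) from by push_cast; ring,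
        Bool.or_eq_true, ih (cs.length - (s+1)) (by omega) (s+1) rfl]
      constructor
      · rintro (h | ⟨i, h1, h2, h3⟩)
        · exact ⟨s, le_refl s, hs, h⟩
        · exact ⟨i, by omega, h2, h3⟩
      · rintro ⟨i, h1, h2, h3⟩
        rcases Nat.eq_or_lt_of_le h1 with h | h
        · subst h; exact Or.inl h3
        · exact Or.inr ⟨i, by omega, h2, h3⟩
    · rw [List.drop_eq_nil_of_le (by omega), PySem.List.enumerate_nil]
      unfold hvsGo
      simp only [Bool.false_eq_true, false_iff]
      rintro ⟨i, h1, h2, _⟩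
      omega

lemma getD_at (cs : List Char) (k : Nat) (h : k < cs.length) : cs.getD k ' ' = cs[k] :=
  List.getD_eq_getElem cs ' ' h

-- a two-character infix is exactly an adjacent pair
lemma pair_infix_iff (cs : List Char) (a b : Char) :
    [a, b] <:+: cs ↔ ∃ k : Nat, k + 1 < cs.length ∧ cs.getD k ' ' = a ∧ cs.getD (k+1) ' ' = b := by
  constructor
  · rintro ⟨u, v, huv⟩
    subst huv
    refine ⟨u.length, by simp, ?_, ?_⟩
    · rw [List.append_assoc, List.getD_append_right u _ ' ' u.length (le_refl _)]
      simp
    · rw [List.append_assoc, List.getD_append_right u _ ' ' (u.length + 1) (by omega)]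
      simp
  · rintro ⟨k, hk, ha, hb⟩
    refine ⟨cs.take k, cs.drop (k + 2), ?_⟩
    have h1 : cs[k]'(by omega) = a := by rw [← getD_at cs k (by omega)]; exact ha
    have h2 : cs[k+1]'hk = b := by rw [← getD_at cs (k+1) hk]; exact hb
    have e1 : cs.drop k = a :: cs.drop (k+1) := by
      rw [List.drop_eq_getElem_cons (by omega), h1]
    have e2 : cs.drop (k+1) = b :: cs.drop (k+2) := by
      rw [List.drop_eq_getElem_cons hk, h2]
    calc cs.take k ++ [a, b] ++ cs.drop (k + 2)
        = cs.take k ++ (a :: (b :: cs.drop (k+2))) := by simp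
      _ = cs.take k ++ cs.drop k := by rw [e1, e2]
      _ = cs := List.take_append_drop k cs

-- B's formula, characterised
lemma alt_iff (cs : List Char) :
    ((PySem.Set.ofList cs).any fun c =>
        PySem.Chars.isalnum c &&
          (PySem.Chars.isIn ['/', c] cs || PySem.Chars.isIn [c, '/'] cs)) = true ↔
      ∃ c, c ∈ cs ∧ PySem.Chars.isalnum c = true ∧ ([ '/', c] <:+: cs ∨ [c, '/'] <:+: cs) := by
  rw [List.any_eq_true]
  constructor
  · rintro ⟨c, hmem, hp⟩
    rw [Bool.and_eq_true, Bool.or_eq_true] at hp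
    refine ⟨c, (PySem.Set.mem_ofList cs c).mp hmem, hp.1, ?_⟩
    rcases hp.2 with h | h
    · exact Or.inl ((PySem.Chars.isIn_iff_infix _ _).mp h)
    · exact Or.inr ((PySem.Chars.isIn_iff_infix _ _).mp h)
  · rintro ⟨c, hmem, hal, hinf⟩
    refine ⟨c, (PySem.Set.mem_ofList cs c).mpr hmem, ?_⟩
    rw [Bool.and_eq_true, Bool.or_eq_true]
    refine ⟨hal, ?_⟩
    rcases hinf with h | h
    · exact Or.inl ((PySem.Chars.isIn_iff_infix _ _).mpr h)
    · exact Or.inr ((PySem.Chars.isIn_iff_infix _ _).mpr h)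

-- the two characterisations coincide
lemma core_eq (cs : List Char) :
    hvsGo cs (PySem.List.enumerate cs 0) =
      ((PySem.Set.ofList cs).any fun c =>
        PySem.Chars.isalnum c &&
          (PySem.Chars.isIn ['/', c] cs || PySem.Chars.isIn [c, '/'] cs)) := by
  have hA := hvsGo_iff cs 0
  rw [List.drop_zero] at hA
  have hB := alt_iff cs
  rcases hb : ((PySem.Set.ofList cs).any fun c =>
      PySem.Chars.isalnum c &&
        (PySem.Chars.isIn ['/', c] cs || PySem.Chars.isIn [c, '/'] cs)) with _ | _
  · rcases ha : hvsGo cs (PySem.List.enumerate cs 0) with _ | _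
    · rfl
    · exfalso
      obtain ⟨i, _, hi, hsl⟩ := hA.mp ha
      rw [← Bool.not_eq_true] at hb
      apply hb
      apply hB.mpr
      unfold slashAt at hsl
      rw [Bool.and_eq_true, Bool.or_eq_true, Bool.and_eq_true, Bool.and_eq_true,
        beq_iff_eq, decide_eq_true_eq, decide_eq_true_eq] at hsl
      obtain ⟨hslash, hnb⟩ := hsl
      rcases hnb with ⟨hpos, hal⟩ | ⟨hlt, hal⟩
      · -- left neighbor c = cs[i-1] is alnum; pattern c '/'
        refine ⟨cs.getD (i-1) ' ', ?_, hal, Or.inr ?_⟩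
        · rw [getD_at cs (i-1) (by omega)]; exact List.getElem_mem _
        · exact (pair_infix_iff cs _ '/').mpr ⟨i - 1, by omega, rfl,
            by rw [show i - 1 + 1 = i from by omega]; exact hslash⟩
      · -- right neighbor c = cs[i+1] is alnum; pattern '/' c
        refine ⟨cs.getD (i+1) ' ', ?_, hal, Or.inl ?_⟩
        · rw [getD_at cs (i+1) hlt]; exact List.getElem_mem _
        · exact (pair_infix_iff cs '/' _).mpr ⟨i, hlt, hslash, rfl⟩
  · obtain ⟨c, hmem, hal, hinf⟩ := hB.mp hb
    apply hA.mpr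
    rcases hinf with h | h
    · -- '/' at k, alnum right neighbor
      obtain ⟨k, hk, h1, h2⟩ := (pair_infix_iff cs '/' c).mp h
      refine ⟨k, Nat.zero_le k, by omega, ?_⟩
      unfold slashAt
      rw [h1, h2, hal, decide_eq_true hk]
      simp
    · -- c at k, '/' at k+1: slash at i = k+1 with alnum left neighbor
      obtain ⟨k, hk, h1, h2⟩ := (pair_infix_iff cs c '/').mp h
      refine ⟨k + 1, Nat.zero_le _, hk, ?_⟩
      unfold slashAt
      rw [show k + 1 - 1 = k from rfl, h1, h2, hal]
      simp

-- ===== VERDICT (by name: the statement is the Claim_ definition above) =====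
theorem has_valid_slash_spec : Claim_equal_has_valid_slash := by
  intro content _
  unfold Spec_has_valid_slash has_valid_slash has_valid_slash_alt
  exact core_eq content.toList
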